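-- pv_equiv track=rewrite | github.com/f0rest-mAker/btl_analysis | transliting.py | translit_th
-- ===== SOURCE A (Python) =====
-- def translit_th(word: str) -> str:
--     result = ""
--     i = 0
--     while i < len(word):
--         if word[i:i+2] == "th":
--             if i > 0 and i < len(word)-2 and word[i-1] in "aeiou" and word[i+2] in "aeiou":
--                 result += "з"
--             else:
--                 result += "с"
--             i += 2
--         else:
--             result += word[i]
--             i += 1
--     return result
-- ===== SOURCE B (Python) =====
-- def translit_th(word: str) -> str:
--     # Jump between occurrences of "th" with str.find and copy the untouched
--     # chunks as slices, instead of walking the string character by character.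
--     out = []
--     pos = 0
--     while True:
--         j = word.find("th", pos)
--         if j < 0:
--             out.append(word[pos:])
--             break
--         out.append(word[pos:j])
--         if 0 < j < len(word) - 2 and word[j - 1] in "aeiou" and word[j + 2] in "aeiou":
--             out.append("з")
--         else:
--             out.append("с")
--         pos = j + 2
--     return "".join(out)
-- ===== Notes on version B (the rewrite author's own statement) =====
-- stated objective: faster
-- what changed: Replaces the per-character while loop (slice compare at every index, char-by-char string accumulation) with str.find jumps between 'th' occurrences, copying the untouched stretches as whole slices and joining once at the end.
import Mathlib
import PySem

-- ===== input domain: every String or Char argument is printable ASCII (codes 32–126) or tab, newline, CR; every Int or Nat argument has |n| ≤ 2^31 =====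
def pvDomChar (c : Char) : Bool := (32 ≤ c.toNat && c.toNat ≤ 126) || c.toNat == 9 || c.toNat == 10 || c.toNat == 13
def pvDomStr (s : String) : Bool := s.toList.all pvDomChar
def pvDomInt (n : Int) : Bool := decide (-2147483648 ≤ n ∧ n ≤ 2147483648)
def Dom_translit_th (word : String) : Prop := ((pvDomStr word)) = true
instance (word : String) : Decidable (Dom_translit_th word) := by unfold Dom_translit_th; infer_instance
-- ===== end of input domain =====

-- B replaces A's per-character while loop by str.find jumps between the "th"
-- occurrences, copying the untouched stretches as whole slices (objective: faster,
-- constant-factor, measured).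

def pvVowels : List Char := ['a', 'e', 'i', 'o', 'u']

-- needed by port B's termination proof: a non-negative findFrom result implies
-- the start index is within the string, the hit is at/after it, "th" sits there,
-- and no earlier position from the start carries it.
theorem pvFindFrom_spec (cs sub : List Char) (pos : Nat)
    (h : ¬ PySem.Chars.findFrom cs sub (pos : Int) none < 0) :
    pos ≤ cs.length ∧ pos ≤ (PySem.Chars.findFrom cs sub (pos : Int) none).toNat ∧
      sub <+: cs.drop (PySem.Chars.findFrom cs sub (pos : Int) none).toNat ∧
      ∀ m : Nat, pos ≤ m → m < (PySem.Chars.findFrom cs sub (pos : Int) none).toNat →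
        ¬ sub <+: cs.drop m := by
  have hle : pos ≤ cs.length := by
    by_contra hgt
    apply h
    simp only [PySem.Chars.findFrom]
    split_ifs with h1 h2 <;> omega
  have hne : PySem.Chars.findFrom cs sub (pos : Int) none ≠ -1 := by omega
  obtain ⟨h1, h2, h3⟩ := PySem.Chars.findFrom_natCast_spec cs sub pos hle hne
  exact ⟨hle, by omega, h2, h3⟩

-- ===== PORT A =====
-- word[i-1] / word[i+2] are only read under guards that put them in range, so
-- getD is exact there; `i < len(word)-2` is Python int arithmetic, kept over Int.
def translitGoA (cs : List Char) (i : Nat) (result : List Char) : List Char :=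
  if _h : i < cs.length then
    if PySem.List.slice cs (some (i : Int)) (some ((i : Int) + 2)) = ['t', 'h'] then
      translitGoA cs (i + 2) (result ++
        (if 0 < i ∧ (i : Int) < (cs.length : Int) - 2 ∧
            pvVowels.contains (cs.getD (i - 1) ' ') ∧ pvVowels.contains (cs.getD (i + 2) ' ')
         then ['з'] else ['с']))
    else
      translitGoA cs (i + 1) (result ++ [cs.getD i ' '])
  else result
termination_by cs.length - i

def translit_th (word : String) : String := String.ofList (translitGoA word.toList 0 [])

-- ===== PORT B =====
def translitGoB (cs : List Char) (pos : Nat) (out : List (List Char)) : List (List Char) :=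
  let j := PySem.Chars.findFrom cs ['t', 'h'] (pos : Int) none
  if _h : j < 0 then
    out ++ [PySem.List.slice cs (some (pos : Int)) none]
  else
    translitGoB cs (j.toNat + 2)
      (out ++ [PySem.List.slice cs (some (pos : Int)) (some j),
        if 0 < j ∧ j < (cs.length : Int) - 2 ∧
            pvVowels.contains (cs.getD (j.toNat - 1) ' ') ∧
            pvVowels.contains (cs.getD (j.toNat + 2) ' ')
        then ['з'] else ['с']])
termination_by cs.length - pos
decreasing_by
  obtain ⟨hle, hpos, hpre, -⟩ := pvFindFrom_spec cs ['t', 'h'] pos _h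
  have := hpre.length_le
  simp only [List.length_drop, List.length_cons, List.length_nil] at this
  omega

def translit_th_alt (word : String) : String :=
  String.ofList (translitGoB word.toList 0 []).flatten

-- ===== PRECONDITION & SPEC =====
def Spec_translit_th (word : String) (out : String) : Prop := out = translit_th_alt word
instance (word : String) (out : String) : Decidable (Spec_translit_th word out) := by
  unfold Spec_translit_th; infer_instance

-- ===== CLAIM (what is proved, stated in full; the proofs are below) =====
def Claim_equal_translit_th : Prop :=
  ∀ (word : String), Dom_translit_th word → Spec_translit_th word (translit_th word)

-- ===== LEMMAS AND PROOFS =====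

theorem pvGoA_acc (cs : List Char) (i : Nat) (res : List Char) :
    translitGoA cs i res = res ++ translitGoA cs i [] := by
  induction hn : cs.length - i using Nat.strong_induction_on generalizing i res with
  | _ n ih =>
  subst hn
  rw [translitGoA.eq_def cs i res, translitGoA.eq_def cs i []]
  by_cases h1 : i < cs.length
  · simp only [dif_pos h1]
    by_cases h2 : PySem.List.slice cs (some (i : Int)) (some ((i : Int) + 2)) = ['t', 'h']
    · simp only [if_pos h2]
      rw [ih (cs.length - (i + 2)) (by omega) (i + 2) _ rfl,
        ih (cs.length - (i + 2)) (by omega) (i + 2) ([] ++ _) rfl]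
      simp
    · simp only [if_neg h2]
      rw [ih (cs.length - (i + 1)) (by omega) (i + 1) _ rfl,
        ih (cs.length - (i + 1)) (by omega) (i + 1) ([] ++ _) rfl]
      simp
  · simp [dif_neg h1]

theorem pvGoB_acc (cs : List Char) (pos : Nat) (out : List (List Char)) :
    translitGoB cs pos out = out ++ translitGoB cs pos [] := by
  induction hn : cs.length - pos using Nat.strong_induction_on generalizing pos out with
  | _ n ih =>
  subst hn
  rw [translitGoB.eq_def cs pos out, translitGoB.eq_def cs pos []]
  by_cases h1 : PySem.Chars.findFrom cs ['t', 'h'] (pos : Int) none < 0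
  · simp [h1]
  · simp only [dif_neg h1]
    obtain ⟨hle, hpos, hpre, -⟩ := pvFindFrom_spec cs ['t', 'h'] pos h1
    have h2 := hpre.length_le
    simp only [List.length_drop, List.length_cons, List.length_nil] at h2
    rw [ih (cs.length - ((PySem.Chars.findFrom cs ['t', 'h'] (pos : Int) none).toNat + 2))
        (by omega) _ _ rfl,
      ih (cs.length - ((PySem.Chars.findFrom cs ['t', 'h'] (pos : Int) none).toNat + 2))
        (by omega) _ ([] ++ _) rfl]
    simp

-- A's branch test is a prefix test
theorem pvSlice_th (cs : List Char) (i : Nat) :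
    (PySem.List.slice cs (some (i : Int)) (some ((i : Int) + 2)) = ['t', 'h']) ↔
      ['t', 'h'] <+: cs.drop i := by
  have h2 : ((i : Int) + 2) = ((i + 2 : Nat) : Int) := by push_cast; ring
  rw [h2, PySem.List.slice_natCast, List.prefix_iff_eq_take]
  have h3 : i + 2 - i = 2 := by omega
  rw [h3]
  exact ⟨fun h => h.symm, fun h => h.symm⟩

-- A copies the tail verbatim when no occurrence remains
theorem pvGoA_no_occ (cs : List Char) (i : Nat) (res : List Char)
    (h : ¬ ['t', 'h'] <:+: cs.drop i) :
    translitGoA cs i res = res ++ cs.drop i := by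
  rw [translitGoA.eq_def]
  by_cases h1 : i < cs.length
  · have hnp : ¬ ['t', 'h'] <+: cs.drop i := fun hp => h hp.isInfix
    simp only [dif_pos h1, if_neg (mt (pvSlice_th cs i).mp hnp)]
    have h' : ¬ ['t', 'h'] <:+: cs.drop (i + 1) := by
      intro hin
      exact h (hin.trans (by rw [← List.tail_drop]; exact (List.tail_suffix _).isInfix))
    rw [pvGoA_no_occ cs (i + 1) _ h']
    rw [List.drop_eq_getElem_cons h1, List.getD_eq_getElem _ _ h1]
    simp
  · rw [dif_neg h1]
    rw [List.drop_eq_nil_of_le (by omega)]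
    simp
termination_by cs.length - i

-- A copies characters verbatim up to the first occurrence
theorem pvGoA_copy (cs : List Char) (i j : Nat) (res : List Char) (hij : i ≤ j)
    (hj : j ≤ cs.length) (h : ∀ m : Nat, i ≤ m → m < j → ¬ ['t', 'h'] <+: cs.drop m) :
    translitGoA cs i res = translitGoA cs j (res ++ (cs.drop i).take (j - i)) := by
  by_cases hlt : i < j
  · rw [translitGoA.eq_def]
    have h1 : i < cs.length := by omega
    simp only [dif_pos h1, if_neg (mt (pvSlice_th cs i).mp (h i le_rfl hlt))]
    rw [pvGoA_copy cs (i + 1) j _ (by omega) hj (fun m hm1 hm2 => h m (by omega) hm2)]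
    congr 1
    rw [List.append_assoc]
    congr 1
    rw [List.drop_eq_getElem_cons h1, List.getD_eq_getElem _ _ h1]
    have h4 : j - i = (j - (i + 1)) + 1 := by omega
    rw [h4, List.take_succ_cons]
    simp
  · have hij2 : i = j := by omega
    subst hij2
    simp
termination_by j - i

theorem pvMain (cs : List Char) (pos : Nat) (hp : pos ≤ cs.length) :
    translitGoA cs pos [] = (translitGoB cs pos []).flatten := by
  rw [translitGoB.eq_def]
  by_cases h1 : PySem.Chars.findFrom cs ['t', 'h'] (pos : Int) none < 0
  · simp only [dif_pos h1]
    have hf := PySem.Chars.findFrom_natCast cs ['t', 'h'] pos hp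
    have hno : ¬ ['t', 'h'] <:+: cs.drop pos := by
      rw [← PySem.Chars.find_eq_neg_one_iff]
      by_contra hne
      rw [if_neg hne] at hf
      have := PySem.Chars.neg_one_le_find (cs.drop pos) ['t', 'h']
      omega
    rw [pvGoA_no_occ cs pos [] hno, PySem.List.slice_from cs (by positivity)]
    simp
  · simp only [dif_neg h1]
    obtain ⟨hle, hpos, hpre, hmin⟩ := pvFindFrom_spec cs ['t', 'h'] pos h1
    set j := PySem.Chars.findFrom cs ['t', 'h'] (pos : Int) none with hj
    have hlen2 := hpre.length_le
    simp only [List.length_drop, List.length_cons, List.length_nil] at hlen2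
    have hjn : j = ((j.toNat : Nat) : Int) := (Int.toNat_of_nonneg (by omega)).symm
    rw [pvGoA_copy cs pos j.toNat [] hpos (by omega) hmin]
    rw [translitGoA.eq_def]
    have hjl : j.toNat < cs.length := by omega
    simp only [dif_pos hjl, if_pos ((pvSlice_th cs j.toNat).mpr hpre)]
    conv_rhs => rw [pvGoB_acc]
    rw [hjn, PySem.List.slice_natCast]
    simp only [Int.toNat_natCast, Int.natCast_pos]
    rw [pvGoA_acc, pvMain cs (j.toNat + 2) (by omega)]
    simp [List.append_assoc]
termination_by cs.length - pos
decreasing_by omega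

-- ===== VERDICT (by name: the statement is the Claim_ definition above) =====
theorem translit_th_spec : Claim_equal_translit_th := by
  intro word _
  unfold Spec_translit_th translit_th translit_th_alt
  rw [pvMain word.toList 0 (Nat.zero_le _)]
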